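-- pv_equiv track=rewrite | github.com/FilippoBotti/linguaggi-Paradigmi | python/skyscraper_iterator.py | skys
-- ===== SOURCE A (Python) =====
-- def skys(lista):
--     a = 0
--     count = 0
--     while count < len(lista):
--         if lista[count] > a:
--             a = lista[count]
--             yield(a)  # ~ append in fib_list, but lazy
--         count += 1
-- ===== SOURCE B (Python) =====
-- from itertools import accumulate
--
-- def skys(lista):
--     acc = list(accumulate(lista, max, initial=0))
--     for prev, cur in zip(acc, acc[1:]):
--         if cur > prev:
--             yield cur
-- ===== Notes on version B (the rewrite author's own statement) =====
-- stated objective: idiomatic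
-- what changed: Replaces the fused index-based while loop by two separated passes: itertools.accumulate(..., max, initial=0) builds the running-maximum sequence, then a pairwise zip walk emits each value that strictly exceeds its predecessor.
import Mathlib
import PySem

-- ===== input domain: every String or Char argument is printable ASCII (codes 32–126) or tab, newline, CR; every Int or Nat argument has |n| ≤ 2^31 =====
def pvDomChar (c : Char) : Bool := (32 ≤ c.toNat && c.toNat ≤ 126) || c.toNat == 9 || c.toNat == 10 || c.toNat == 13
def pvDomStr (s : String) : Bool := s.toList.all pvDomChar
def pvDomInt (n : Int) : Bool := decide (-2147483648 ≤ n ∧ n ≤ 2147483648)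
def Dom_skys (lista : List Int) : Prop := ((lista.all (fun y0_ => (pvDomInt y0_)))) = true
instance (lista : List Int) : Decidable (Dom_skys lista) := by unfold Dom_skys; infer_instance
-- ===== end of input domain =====

-- B separates the running-maximum pass (accumulate with initial=0) from the strictly-increasing
-- emission pass; A fuses both into one indexed while loop. Both are Python generators; the
-- equivalence is about the sequence of yielded values.

-- ===== PORT A =====
-- A's while loop over count with state a: structural recursion over the remaining list
def skysLoop (a : Int) : List Int → List Int
  | [] => []
  | x :: xs => if x > a then x :: skysLoop x xs else skysLoop a xs

def skys (lista : List Int) : List Int := skysLoop 0 lista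

-- ===== PORT B =====
-- accumulate(lista, max, initial=0) = List.scanl max 0; then the pairwise zip walk with the filter
def skys_alt (lista : List Int) : List Int :=
  let acc := List.scanl max 0 lista
  (acc.zip (acc.drop 1)).filterMap (fun p => if p.2 > p.1 then some p.2 else none)

-- ===== PRECONDITION & SPEC =====
def Spec_skys (lista : List Int) (out : List Int) : Prop := out = skys_alt lista
instance (lista : List Int) (out : List Int) : Decidable (Spec_skys lista out) := by unfold Spec_skys; infer_instance

-- ===== CLAIM (what is proved, stated in full; the proofs are below) =====
def Claim_equal_skys : Prop := ∀ (lista : List Int), Dom_skys lista → Spec_skys lista (skys lista)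

-- ===== LEMMAS AND PROOFS =====

-- B's second pass, as a function of the accumulated sequence
def pairsEm (l : List Int) : List Int :=
  (l.zip (l.drop 1)).filterMap (fun p => if p.2 > p.1 then some p.2 else none)

theorem skysLoop_eq_pairsEm (xs : List Int) : ∀ (a : Int),
    skysLoop a xs = pairsEm (List.scanl max a xs) := by
  induction xs with
  | nil => intro a; simp [skysLoop, pairsEm, List.scanl]
  | cons x xs ih =>
    intro a
    obtain ⟨t, ht⟩ : ∃ t, List.scanl max (max a x) xs = (max a x) :: t := by
      cases xs with
      | nil => exact ⟨[], by simp⟩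
      | cons y ys => exact ⟨_, by rw [List.scanl_cons]⟩
    have hrhs : pairsEm (List.scanl max a (x :: xs)) =
        (if max a x > a then [max a x] else []) ++ pairsEm (List.scanl max (max a x) xs) := by
      rw [List.scanl_cons, ht]
      simp only [pairsEm, List.zip_cons_cons, List.drop_succ_cons, List.drop_zero,
        List.filterMap_cons]
      split_ifs <;> simp
    rw [hrhs, ← ih (max a x)]
    by_cases h : x > a
    · have hm : max a x = x := max_eq_right (le_of_lt h)
      rw [hm]
      simp [skysLoop, h]
    · have hm : max a x = a := max_eq_left (by omega)
      rw [hm]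
      simp [skysLoop, h]

-- ===== VERDICT =====
theorem skys_spec : Claim_equal_skys := by
  intro lista _
  show skys lista = skys_alt lista
  simpa [skys, skys_alt, pairsEm] using skysLoop_eq_pairsEm lista 0
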